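-- pv_equiv track=rewrite | github.com/yuriyuka/BadouNLP | 张冲/week15/npe.py | bulid_len_dict
-- ===== SOURCE A (Python) =====
-- def bulid_len_dict(vocab):
--     max_word_len = 0
--     dict_map = {}
--     prefix_vocab = {}
--     for i in range(len(vocab)):
--         prefix_vocab[i] = vocab[i]
--     while True:
--         is_break = True
--         for i in range(255, len(vocab)):
--             if max(prefix_vocab[i]) > 255:
--                 is_break = False
--                 new_arr = []
--                 for v in prefix_vocab[i]:
--                     if v > 255:
--                         for n in prefix_vocab[v]:
--                             new_arr.append(n)
--                     else:
--                         new_arr.append(v)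
--                 prefix_vocab[i] = new_arr
--         if is_break:
--             break
--
--     dict_list = [prefix_vocab[k] for k in prefix_vocab]
--     for line in dict_list:
--         word_len = len(line)
--         if word_len not in dict_map:
--             dict_map[word_len] = []
--         dict_map[word_len].append(line)
--         max_word_len = max(max_word_len, word_len)
--     return max_word_len, dict_map, prefix_vocab
-- ===== SOURCE B (Python) =====
-- def bulid_len_dict(vocab):
--     # Memoized top-down expansion: each token index >= 255 is flattened once,
--     # recursively, instead of A's repeated whole-table substitution passes.
--     cache = {}
--
--     def expand(i):
--         if i in cache:
--             return cache[i]
--         out = []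
--         for v in vocab[i]:
--             if v > 255:
--                 out.extend(expand(v))
--             else:
--                 out.append(v)
--         cache[i] = out
--         return out
--
--     flat_list = [line if i < 255 else expand(i) for i, line in enumerate(vocab)]
--     max_word_len = 0
--     dict_map = {}
--     for line in flat_list:
--         word_len = len(line)
--         dict_map.setdefault(word_len, []).append(line)
--         max_word_len = max(max_word_len, word_len)
--     return max_word_len, dict_map, dict(enumerate(flat_list))
-- ===== Notes on version B (the rewrite author's own statement) =====
-- stated objective: alternative
-- what changed: B replaces A's fixed-point while-loop (rescanning and re-substituting all entries until none contains a token >255) by memoized top-down recursive expansion that flattens each token once, and drops the auxiliary index dict in favour of a plain list.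
import Mathlib
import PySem

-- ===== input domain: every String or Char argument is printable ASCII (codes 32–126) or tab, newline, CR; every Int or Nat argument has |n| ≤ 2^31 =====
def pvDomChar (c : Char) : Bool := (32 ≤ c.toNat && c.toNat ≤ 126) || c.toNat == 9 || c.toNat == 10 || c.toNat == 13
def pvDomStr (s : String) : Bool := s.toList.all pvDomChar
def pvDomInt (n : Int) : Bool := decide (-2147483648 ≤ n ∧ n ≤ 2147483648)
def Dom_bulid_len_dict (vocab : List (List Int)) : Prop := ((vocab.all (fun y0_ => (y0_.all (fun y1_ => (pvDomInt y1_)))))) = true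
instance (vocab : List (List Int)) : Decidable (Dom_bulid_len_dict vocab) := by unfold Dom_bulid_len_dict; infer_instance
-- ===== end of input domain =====

-- B replaces A's fixed-point rescanning loop by memoized top-down recursive expansion (objective: alternative).

-- ===== PORT A =====
-- inner expansion of one entry (the 'new_arr' loop)
def pvAExpand (pv : PySem.Dict Int (List Int)) (line : List Int) : List Int :=
  line.foldl (fun acc v => if v > 255 then acc ++ pv.getD v [] else acc ++ [v]) []

-- one execution of 'for i in range(255, len(vocab))' carrying (is_break, prefix_vocab)
def pvAPass (n : Int) (pv : PySem.Dict Int (List Int)) : Bool × PySem.Dict Int (List Int) :=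
  (PySem.List.pyRange 255 n 1).foldl (fun st i =>
    match PySem.List.max? (st.2.getD i []) (fun y => y) with
    | none => st  -- max([]) raises ValueError in Python; such inputs are excluded by Pre_
    | some m => if m > 255 then (false, st.2.insert i (pvAExpand st.2 (st.2.getD i []))) else st)
    (true, pv)

-- the 'while True' loop; the fuel (len+2 passes) is never exhausted on inputs admitted by Pre_
def pvALoop : Nat → Int → PySem.Dict Int (List Int) → PySem.Dict Int (List Int)
  | 0, _, pv => pv
  | Nat.succ fuel, n, pv =>
    let r := pvAPass n pv
    if r.1 then r.2 else pvALoop fuel n r.2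

def bulid_len_dict (vocab : List (List Int)) : Int × (List (Int × List (List Int))) × (List (Int × List Int)) :=
  let n : Int := vocab.length
  let prefix_vocab : PySem.Dict Int (List Int) :=
    (PySem.List.pyRange 0 n 1).foldl (fun d i => d.insert i (PySem.List.pyGetD vocab i [])) PySem.Dict.empty
  let prefix_vocab := pvALoop (vocab.length + 2) n prefix_vocab
  let dict_list := prefix_vocab.keys.map (fun k => prefix_vocab.getD k [])
  let res := dict_list.foldl (fun (st : Int × PySem.Dict Int (List (List Int))) line =>
      let word_len : Int := line.length
      let dm := if st.2.contains word_len then st.2 else st.2.insert word_len []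
      (max st.1 word_len, dm.modify word_len [] (fun ls => ls ++ [line])))
    (0, PySem.Dict.empty)
  (res.1, res.2.items, prefix_vocab.items)

-- ===== PORT B =====
-- Source B's recursive memoized 'expand': the cache is threaded explicitly; the fuel only
-- makes the recursion structural and is never exhausted on inputs admitted by Pre_
def pvBExpand (vocab : List (List Int)) : Nat → Int → PySem.Dict Int (List Int) → List Int × PySem.Dict Int (List Int)
  | 0, _, c => ([], c)
  | fuel+1, i, c =>
    match c.get? i with
    | some r => (r, c)
    | none =>
      let st := (PySem.List.pyGetD vocab i []).foldl
        (fun (st : List Int × PySem.Dict Int (List Int)) v =>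
          if v > 255 then
            let r := pvBExpand vocab fuel v st.2
            (st.1 ++ r.1, r.2)
          else (st.1 ++ [v], st.2)) ([], c)
      (st.1, st.2.insert i st.1)

def bulid_len_dict_alt (vocab : List (List Int)) : Int × (List (Int × List (List Int))) × (List (Int × List Int)) :=
  -- flat_list = [line if i < 255 else expand(i) for i, line in enumerate(vocab)]
  let st := (PySem.List.enumerate vocab 0).foldl
    (fun (st : List (List Int) × PySem.Dict Int (List Int)) p =>
      if p.1 < 255 then (st.1 ++ [p.2], st.2)
      else
        let r := pvBExpand vocab (vocab.length + 1) p.1 st.2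
        (st.1 ++ [r.1], r.2)) ([], PySem.Dict.empty)
  let flat := st.1
  let res := flat.foldl (fun (st : Int × PySem.Dict Int (List (List Int))) line =>
      let word_len : Int := line.length
      (max st.1 word_len,
        if st.2.contains word_len then st.2.modify word_len [] (fun ls => ls ++ [line])
        else st.2.insert word_len [line]))
    (0, PySem.Dict.empty)
  let pvd := (PySem.List.enumerate flat 0).foldl (fun d p => d.insert p.1 p.2) PySem.Dict.empty
  (res.1, res.2.items, pvd.items)

-- ===== PRECONDITION & SPEC =====
-- pvOK vocab k i says: every chain of BPE references (a token v > 255 refers to entry v)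
-- starting at index i stays inside the vocab and has depth < k — a shape property of the
-- input's reference graph (in-range and acyclic), checked without running either program.
def pvOK (vocab : List (List Int)) : Nat → Int → Bool
  | 0, _ => false
  | k+1, i => decide (0 ≤ i) && decide (i < (vocab.length : Int)) &&
      (PySem.List.pyGetD vocab i []).all (fun v => decide (v ≤ 255) || pvOK vocab k v)

-- Pre_ excludes exactly the inputs on which A does not return normally: a vocab whose entry at
-- some index i ≥ 255 has no tokens (ValueError from max of a zero-length entry), a token > 255
-- that is not a valid index (KeyError), or cyclic reference chains (A's while-loop never
-- terminates); on every input A returns on, Pre_ holds.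
def Pre_bulid_len_dict (vocab : List (List Int)) : Prop :=
  ∀ p ∈ PySem.List.enumerate vocab 0, 255 ≤ p.1 →
    p.2 ≠ [] ∧ pvOK vocab (vocab.length + 1) p.1 = true
instance (vocab : List (List Int)) : Decidable (Pre_bulid_len_dict vocab) := by
  unfold Pre_bulid_len_dict; infer_instance

def pvWitness_bulid_len_dict : List (List Int) := [[104, 101], [108, 300]]

def Spec_bulid_len_dict (vocab : List (List Int)) (out : Int × (List (Int × List (List Int))) × (List (Int × List Int))) : Prop := out = bulid_len_dict_alt vocab
instance (vocab : List (List Int)) (out : Int × (List (Int × List (List Int))) × (List (Int × List Int))) : Decidable (Spec_bulid_len_dict vocab out) := by unfold Spec_bulid_len_dict; infer_instance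

-- ===== CLAIM (what is proved, stated in full; the proofs are below) =====
def Claim_equal_bulid_len_dict : Prop := ∀ (vocab : List (List Int)), Dom_bulid_len_dict vocab → Pre_bulid_len_dict vocab → Spec_bulid_len_dict vocab (bulid_len_dict vocab)

-- ===== LEMMAS AND PROOFS =====

-- full expansion of token i, with fuel bounding the depth of the recursion
def pvE (vocab : List (List Int)) : Nat → Int → List Int
  | 0, _ => []
  | k+1, i => (PySem.List.pyGetD vocab i []).flatMap
      (fun v => if 255 < v then pvE vocab k v else [v])

-- the semantic value of a partially-expanded entry content
def pvSem (vocab : List (List Int)) (xs : List Int) : List Int :=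
  xs.flatMap (fun v => if 255 < v then pvE vocab (vocab.length + 1) v else [v])

-- the fully flattened table both programs converge to
def pvFlatL (vocab : List (List Int)) : List (List Int) :=
  (PySem.List.enumerate vocab 0).map
    (fun p => if p.1 < 255 then p.2 else pvE vocab (vocab.length + 1) p.1)

-- the dict {0: l[0], 1: l[1], ...}
def pvMkE (l : List (List Int)) : PySem.Dict Int (List Int) :=
  PySem.Dict.mk (PySem.List.enumerate l 0)

-- A's loop body, named for the proofs
def pvStep (st : Bool × PySem.Dict Int (List Int)) (j : Int) : Bool × PySem.Dict Int (List Int) :=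
  match PySem.List.max? (st.2.getD j []) (fun y => y) with
  | none => st
  | some m => if m > 255 then (false, st.2.insert j (pvAExpand st.2 (st.2.getD j []))) else st

theorem pvAPass_eq (n : Int) (pv : PySem.Dict Int (List Int)) :
    pvAPass n pv = (PySem.List.pyRange 255 n 1).foldl pvStep (true, pv) := by
  rfl

-- list-level expansion of one entry against a table L
def pvExpL (L : List (List Int)) (xs : List Int) : List Int :=
  xs.foldl (fun acc v => if v > 255 then acc ++ PySem.List.pyGetD L v [] else acc ++ [v]) []

-- the invariant carried through A's passes
def pvInv (vocab L : List (List Int)) : Prop :=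
  L.length = vocab.length ∧
  (∀ j : Nat, j < 255 → L.getD j [] = vocab.getD j []) ∧
  (∀ j : Nat, j < vocab.length → 255 ≤ j →
      pvSem vocab (L.getD j []) = pvE vocab (vocab.length + 1) (j : Int)) ∧
  (∀ j : Nat, j < vocab.length → 255 ≤ j → ∀ k, pvOK vocab (k+1) (j : Int) = true →
      ∀ w ∈ L.getD j [], 255 < w → pvOK vocab k w = true)

-- depth bound on the tokens still present in the table
def pvTok (vocab : List (List Int)) (k : Nat) (L : List (List Int)) : Prop :=
  ∀ j : Nat, j < vocab.length → 255 ≤ j → ∀ w ∈ L.getD j [], 255 < w → pvOK vocab k w = true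

-- cache invariant for B's memoized expansion
def pvCacheOK (vocab : List (List Int)) (c : PySem.Dict Int (List Int)) : Prop :=
  ∀ (j : Int) (r : List Int), c.get? j = some r → r = pvE vocab (vocab.length + 1) j

theorem pv_flatMap_congr {a b : Type} (l : List a) (f g : a → List b)
    (h : ∀ x ∈ l, f x = g x) : l.flatMap f = l.flatMap g := by
  simp only [List.flatMap_def]
  rw [List.map_congr_left h]

theorem pvOK_range (vocab : List (List Int)) (k : Nat) (i : Int)
    (h : pvOK vocab k i = true) : 0 ≤ i ∧ i < (vocab.length : Int) := by
  cases k with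
  | zero => simp [pvOK] at h
  | succ k =>
    simp only [pvOK, Bool.and_eq_true, decide_eq_true_eq] at h
    exact ⟨h.1.1, h.1.2⟩

theorem pvOK_tokens (vocab : List (List Int)) (k : Nat) (i : Int)
    (h : pvOK vocab (k+1) i = true) :
    ∀ v ∈ PySem.List.pyGetD vocab i [], 255 < v → pvOK vocab k v = true := by
  simp only [pvOK, Bool.and_eq_true, List.all_eq_true, Bool.or_eq_true, decide_eq_true_eq] at h
  intro v hv h255
  rcases h.2 v hv with h1 | h1
  · omega
  · exact h1

theorem pvOK_mono (vocab : List (List Int)) (k : Nat) (i : Int)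
    (h : pvOK vocab k i = true) : ∀ m, k ≤ m → pvOK vocab m i = true := by
  induction k generalizing i with
  | zero => simp [pvOK] at h
  | succ k ih =>
    intro m hm
    obtain ⟨m', rfl⟩ : ∃ m', m = m' + 1 := ⟨m - 1, by omega⟩
    simp only [pvOK, Bool.and_eq_true, List.all_eq_true, Bool.or_eq_true, decide_eq_true_eq] at h ⊢
    refine ⟨h.1, ?_⟩
    intro v hv
    rcases h.2 v hv with h1 | h1
    · exact Or.inl h1
    · exact Or.inr (ih v h1 m' (by omega))

theorem pvE_stable (vocab : List (List Int)) (k : Nat) (i : Int)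
    (h : pvOK vocab k i = true) : ∀ m, k ≤ m → pvE vocab m i = pvE vocab k i := by
  induction k generalizing i with
  | zero => simp [pvOK] at h
  | succ k ih =>
    intro m hm
    obtain ⟨m', rfl⟩ : ∃ m', m = m' + 1 := ⟨m - 1, by omega⟩
    simp only [pvE]
    apply pv_flatMap_congr
    intro v hv
    by_cases h255 : 255 < v
    · rw [if_pos h255, if_pos h255]
      have hok := pvOK_tokens vocab k i h v hv h255
      rw [ih v hok m' (by omega), ih v hok k (le_refl _)]
    · rw [if_neg h255, if_neg h255]

theorem pvE_sem (vocab : List (List Int)) (i : Int)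
    (h : pvOK vocab (vocab.length + 1) i = true) :
    pvSem vocab (PySem.List.pyGetD vocab i []) = pvE vocab (vocab.length + 1) i := by
  have h1 : pvSem vocab (PySem.List.pyGetD vocab i []) = pvE vocab (vocab.length + 1 + 1) i := rfl
  rw [h1, pvE_stable vocab (vocab.length + 1) i h (vocab.length + 1 + 1) (by omega)]

theorem pv_getD_set_self (L : List (List Int)) (i : Nat) (N : List Int) (h : i < L.length) :
    (L.set i N).getD i [] = N := by
  rw [List.getD_eq_getElem _ _ (by simpa using h)]
  simp [List.getElem_set_self]

theorem pv_getD_set_ne (L : List (List Int)) (i : Nat) (N : List Int) (j : Nat) (h : j ≠ i) :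
    (L.set i N).getD j [] = L.getD j [] := by
  simp only [List.getD_eq_getElem?_getD]
  rw [List.getElem?_set_ne (by omega)]

theorem pv_pyGetD_getD (L : List (List Int)) (v : Int) (h0 : 0 ≤ v) :
    PySem.List.pyGetD L v [] = L.getD v.toNat [] := by
  rw [show v = ((v.toNat : Nat) : Int) from by omega, PySem.List.pyGetD_natCast]
  congr 1

theorem pvExpL_flatMap (flat : List (List Int)) (line : List Int) :
    pvExpL flat line = line.flatMap (fun v => if v > 255 then PySem.List.pyGetD flat v [] else [v]) := by
  unfold pvExpL
  rw [PySem.List.foldl_congr_mem _ _ (fun out v => out ++ (if v > 255 then PySem.List.pyGetD flat v [] else [v])) _ (by intro acc v _; split <;> simp_all)]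
  rw [PySem.List.foldl_append_eq_flatMap]
  simp

theorem pv_getD_mkEnum (l : List (List Int)) (s i : Int) (d : List Int)
    (h1 : s ≤ i) (h2 : i < s + l.length) :
    (PySem.Dict.mk (PySem.List.enumerate l s)).getD i d = l.getD (i - s).toNat d := by
  induction l generalizing s with
  | nil => simp at h2; omega
  | cons a t ih =>
    rw [PySem.List.enumerate_cons]
    simp only [PySem.Dict.getD]
    rw [PySem.Dict.get?_mk_cons]
    by_cases hi : s = i
    · subst hi
      simp
    · rw [if_neg (by simp [hi])]
      have ih' := ih (s+1) (by omega) (by simp only [List.length_cons] at h2; push_cast at h2 ⊢; omega)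
      simp only [PySem.Dict.getD] at ih'
      rw [ih']
      rw [show (i - s).toNat = (i - (s+1)).toNat + 1 from by omega, List.getD_cons_succ]

theorem pvMkE_getD (l : List (List Int)) (v : Int) (h0 : 0 ≤ v) (hv : v < (l.length : Int)) :
    (pvMkE l).getD v [] = PySem.List.pyGetD l v [] := by
  unfold pvMkE
  rw [pv_getD_mkEnum l 0 v [] h0 (by simpa using hv)]
  rw [show v = ((v.toNat : Nat) : Int) from by omega, PySem.List.pyGetD_natCast]
  congr 1

theorem pv_map_replace_id (t : List (List Int)) (s i : Int) (v : List Int) (hi : i < s) :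
    (PySem.List.enumerate t s).map (fun p => if p.1 == i then (i, v) else p) =
      PySem.List.enumerate t s := by
  induction t generalizing s with
  | nil => rfl
  | cons a t ih =>
    rw [PySem.List.enumerate_cons, List.map_cons]
    rw [if_neg (by simp; omega)]
    rw [ih (s+1) (by omega)]

theorem pv_map_replace (l : List (List Int)) (s i : Int) (v : List Int)
    (h1 : s ≤ i) (h2 : i < s + l.length) :
    (PySem.List.enumerate l s).map (fun p => if p.1 == i then (i, v) else p) =
      PySem.List.enumerate (l.set (i - s).toNat v) s := by
  induction l generalizing s with
  | nil => rfl
  | cons a t ih =>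
    by_cases hi : s = i
    · subst hi
      rw [show (s - s).toNat = 0 from by omega, List.set_cons_zero]
      rw [PySem.List.enumerate_cons, PySem.List.enumerate_cons, List.map_cons]
      rw [if_pos (by simp)]
      rw [pv_map_replace_id t (s+1) s v (by omega)]
    · rw [show (i - s).toNat = (i - (s+1)).toNat + 1 from by omega, List.set_cons_succ]
      rw [PySem.List.enumerate_cons, PySem.List.enumerate_cons, List.map_cons]
      rw [if_neg (by simp [hi])]
      rw [ih (s+1) (by omega) (by simp only [List.length_cons] at h2; push_cast at h2 ⊢; omega)]

theorem pv_insert_mkEnum (l : List (List Int)) (s i : Int) (v : List Int)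
    (h1 : s ≤ i) (h2 : i < s + l.length) :
    (PySem.Dict.mk (PySem.List.enumerate l s)).insert i v =
      PySem.Dict.mk (PySem.List.enumerate (l.set (i - s).toNat v) s) := by
  have hcont : (PySem.Dict.mk (PySem.List.enumerate l s)).contains i = true := by
    unfold PySem.Dict.contains
    rw [List.any_eq_true]
    refine ⟨(i, l[(i-s).toNat]'(by omega)), ?_, by simp⟩
    rw [PySem.List.mem_enumerate_iff]
    exact ⟨(i-s).toNat, by omega, by simp [Prod.ext_iff]; omega⟩
  simp only [PySem.Dict.insert, hcont, if_true]
  congr 1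
  exact pv_map_replace l s i v h1 h2

theorem pv_foldl_insert_enum (l : List (List Int)) (s : Int) (ps : List (Int × List Int))
    (h : ∀ q ∈ ps, q.1 < s) :
    (PySem.List.enumerate l s).foldl (fun d p => d.insert p.1 p.2) (PySem.Dict.mk ps) =
      PySem.Dict.mk (ps ++ PySem.List.enumerate l s) := by
  induction l generalizing s ps with
  | nil => simp [PySem.List.enumerate_nil]
  | cons a t ih =>
    rw [PySem.List.enumerate_cons, List.foldl_cons]
    have hc : (PySem.Dict.mk ps).contains s = false := by
      unfold PySem.Dict.contains
      rw [List.any_eq_false]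
      intro q hq
      have := h q hq
      simp
      omega
    have hins : (PySem.Dict.mk ps).insert s a = PySem.Dict.mk (ps ++ [(s,a)]) := by
      simp only [PySem.Dict.insert, hc]
      simp
    rw [hins, ih (s+1) _ (by
      intro q hq
      rcases List.mem_append.mp hq with h1 | h1
      · have hq1 := h q h1; omega
      · rw [List.mem_singleton.mp h1]; exact lt_add_one s)]
    simp

theorem pv_init (vocab : List (List Int)) :
    (PySem.List.pyRange 0 (vocab.length : Int) 1).foldl
        (fun d i => d.insert i (PySem.List.pyGetD vocab i [])) PySem.Dict.empty =
      pvMkE vocab := by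
  have he : PySem.List.enumerate vocab 0 =
      (PySem.List.pyRange 0 (vocab.length : Int) 1).map (fun j => (j, PySem.List.pyGetD vocab j [])) := by
    have := PySem.List.enumerate_eq_map_pyRange vocab []
    simpa using this
  have h2 := pv_foldl_insert_enum vocab 0 [] (by simp)
  rw [he] at h2
  rw [List.foldl_map] at h2
  simpa [pvMkE, ← he] using h2

theorem pv_keys_map_getD (l : List (List Int)) :
    (pvMkE l).keys.map (fun k => (pvMkE l).getD k []) = l := by
  have hk : (pvMkE l).keys = PySem.List.pyRange 0 (l.length : Int) 1 := by
    unfold pvMkE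
    simp only [PySem.Dict.keys]
    rw [PySem.List.map_fst_enumerate]
    norm_num
  rw [hk]
  rw [List.map_congr_left (fun k hkk => by
    have := PySem.List.mem_pyRange_one.mp hkk
    exact pvMkE_getD l k this.1 this.2)]
  exact PySem.List.map_pyGetD_pyRange_zero' l []

theorem pv_group_step (d : PySem.Dict Int (List (List Int))) (wl : Int) (line : List Int) :
    (if d.contains wl then d else d.insert wl []).modify wl [] (fun ls => ls ++ [line]) =
      d.insert wl (d.getD wl [] ++ [line]) := by
  by_cases hc : d.contains wl
  · rw [if_pos hc]
    simp only [PySem.Dict.modify]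
  · rw [if_neg hc]
    have hcf : d.contains wl = false := by simpa using hc
    simp only [PySem.Dict.modify]
    rw [PySem.Dict.getD_insert_self, PySem.Dict.getD_of_not_contains d [] hcf]
    have hkey : ∀ q ∈ d.items, (q.1 == wl) = false := by
      have := hcf
      unfold PySem.Dict.contains at this
      rw [List.any_eq_false] at this
      intro q hq
      simpa using this q hq
    simp only [PySem.Dict.insert, hcf, Bool.false_eq_true, if_false]
    have hc2 : (PySem.Dict.mk (d.items ++ [(wl, ([] : List (List Int)))])).contains wl = true := by
      unfold PySem.Dict.contains
      simp
    rw [hc2]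
    simp only [if_true]
    congr 1
    rw [List.map_append]
    rw [List.map_congr_left (fun q hq => by rw [if_neg (by simp [hkey q hq])])]
    simp

theorem pv_group_step_b (d : PySem.Dict Int (List (List Int))) (wl : Int) (line : List Int) :
    (if d.contains wl then d.modify wl [] (fun ls => ls ++ [line]) else d.insert wl [line]) =
      d.insert wl (d.getD wl [] ++ [line]) := by
  by_cases hc : d.contains wl
  · rw [if_pos hc]
    simp only [PySem.Dict.modify]
  · rw [if_neg hc]
    have hcf : d.contains wl = false := by simpa using hc
    rw [PySem.Dict.getD_of_not_contains d [] hcf]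
    simp

theorem pvFlatL_length (vocab : List (List Int)) : (pvFlatL vocab).length = vocab.length := by
  simp [pvFlatL]

theorem pvFlatL_getD (vocab : List (List Int)) (j : Nat) (hj : j < vocab.length) :
    (pvFlatL vocab).getD j [] =
      if j < 255 then vocab.getD j [] else pvE vocab (vocab.length + 1) (j : Int) := by
  rw [List.getD_eq_getElem _ _ (by rw [pvFlatL_length]; exact hj)]
  unfold pvFlatL
  simp only [List.getElem_map, PySem.List.getElem_enumerate, zero_add]
  by_cases h : j < 255
  · rw [if_pos (by exact_mod_cast h), if_pos h, List.getD_eq_getElem _ _ hj]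
  · rw [if_neg (by exact_mod_cast h), if_neg h]

theorem pv_pre_spec (vocab : List (List Int)) (h : Pre_bulid_len_dict vocab)
    (j : Nat) (hj : j < vocab.length) (h255 : 255 ≤ j) :
    pvOK vocab (vocab.length + 1) (j : Int) = true := by
  have hm : ((j : Int), vocab[j]) ∈ PySem.List.enumerate vocab 0 := by
    rw [PySem.List.mem_enumerate_iff]
    exact ⟨j, hj, by simp⟩
  have hle : (255 : Int) ≤ (j : Int) := by exact_mod_cast h255
  exact (h _ hm hle).2

theorem pvExpL_sem (vocab L : List (List Int)) (xs : List Int)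
    (hx : ∀ v ∈ xs, 255 < v → 0 ≤ v ∧ v < (vocab.length : Int) ∧
        pvSem vocab (L.getD v.toNat []) = pvE vocab (vocab.length + 1) v) :
    pvSem vocab (pvExpL L xs) = pvSem vocab xs := by
  rw [pvExpL_flatMap]
  unfold pvSem
  rw [List.flatMap_assoc]
  apply pv_flatMap_congr
  intro v hv
  by_cases h255 : 255 < v
  · rw [if_pos (by omega : v > 255), if_pos h255]
    obtain ⟨h0, hn, hsem⟩ := hx v hv h255
    rw [pv_pyGetD_getD L v h0]
    exact hsem
  · rw [if_neg (by omega : ¬ v > 255), if_neg h255]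
    simp [h255]

theorem pvExpL_tok (vocab L : List (List Int)) (xs : List Int) (k : Nat)
    (hJ : ∀ j : Nat, j < vocab.length → 255 ≤ j → ∀ k', pvOK vocab (k'+1) (j : Int) = true →
        ∀ w ∈ L.getD j [], 255 < w → pvOK vocab k' w = true)
    (hx : ∀ v ∈ xs, 255 < v → pvOK vocab (k+1) v = true) :
    ∀ w ∈ pvExpL L xs, 255 < w → pvOK vocab k w = true := by
  rw [pvExpL_flatMap]
  intro w hw h255w
  obtain ⟨v, hv, hwv⟩ := List.mem_flatMap.mp hw
  by_cases h255 : 255 < v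
  · rw [if_pos (by omega : v > 255)] at hwv
    have hok := hx v hv h255
    have hrange := pvOK_range vocab (k+1) v hok
    rw [pv_pyGetD_getD L v hrange.1] at hwv
    have hjlt : v.toNat < vocab.length := by omega
    have hj255 : 255 ≤ v.toNat := by omega
    have hcast : ((v.toNat : Nat) : Int) = v := by omega
    exact hJ v.toNat hjlt hj255 k (by rw [hcast]; exact hok) w hwv h255w
  · rw [if_neg (by omega : ¬ v > 255)] at hwv
    have : w = v := List.mem_singleton.mp hwv
    omega

theorem pvExpL_tok' (vocab L : List (List Int)) (xs : List Int) (k : Nat)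
    (hJ : ∀ j : Nat, j < vocab.length → 255 ≤ j → ∀ k', pvOK vocab (k'+1) (j : Int) = true →
        ∀ w ∈ L.getD j [], 255 < w → pvOK vocab k' w = true)
    (hx : ∀ v ∈ xs, 255 < v → pvOK vocab k v = true) :
    ∀ w ∈ pvExpL L xs, 255 < w → pvOK vocab k w = true := by
  cases k with
  | zero =>
    rw [pvExpL_flatMap]
    intro w hw h255w
    obtain ⟨v, hv, hwv⟩ := List.mem_flatMap.mp hw
    by_cases h255 : 255 < v
    · have := hx v hv h255
      simp [pvOK] at this
    · rw [if_neg (by omega : ¬ v > 255)] at hwv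
      have : w = v := List.mem_singleton.mp hwv
      omega
  | succ k =>
    intro w hw h255w
    exact pvOK_mono vocab k w (pvExpL_tok vocab L xs k hJ hx w hw h255w) (k+1) (by omega)

theorem pv_mkE_getD_nat (L : List (List Int)) (j : Nat) (hj : j < L.length) :
    (pvMkE L).getD (j : Int) [] = L.getD j [] := by
  rw [pvMkE_getD L (j : Int) (by omega) (by exact_mod_cast hj), PySem.List.pyGetD_natCast]

theorem pv_insert_mkE (L : List (List Int)) (j : Nat) (N : List Int) (hj : j < L.length) :
    (pvMkE L).insert (j : Int) N = pvMkE (L.set j N) := by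
  unfold pvMkE
  rw [pv_insert_mkEnum L 0 (j : Int) N (by omega) (by simpa using hj)]
  norm_num

theorem pv_pass1 (vocab : List (List Int)) (m : Nat) :
    ∀ (c i : Nat), 255 ≤ i → i ≤ vocab.length → vocab.length - i = c →
    ∀ (b : Bool) (L : List (List Int)),
      pvInv vocab L →
      (∀ j : Nat, i ≤ j → j < vocab.length → ∀ w ∈ L.getD j [], 255 < w → pvOK vocab (m+1) w = true) →
      (∀ j : Nat, 255 ≤ j → j < i → ∀ w ∈ L.getD j [], 255 < w → pvOK vocab m w = true) →
      ∃ b' L',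
        (PySem.List.pyRange (i : Int) (vocab.length : Int) 1).foldl pvStep (b, pvMkE L) = (b', pvMkE L') ∧
        pvInv vocab L' ∧
        pvTok vocab m L' ∧
        (b' = true → b = true ∧ L' = L ∧
          ∀ j : Nat, i ≤ j → j < vocab.length → ∀ w ∈ L.getD j [], w ≤ 255) := by
  intro c
  induction c with
  | zero =>
    intro i h255 hile heq b L hinv habove hbelow
    have hi : i = vocab.length := by omega
    subst hi
    rw [PySem.List.pyRange_one_eq_nil (le_refl _), List.foldl_nil]
    refine ⟨b, L, rfl, hinv, ?_, ?_⟩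
    · intro j hj hj255 w hw h255w
      exact hbelow j hj255 (by omega) w hw h255w
    · intro hb'
      exact ⟨hb', rfl, by intro j hj1 hj2; omega⟩
  | succ c ih =>
    intro i h255 hile heq b L hinv habove hbelow
    have hi : i < vocab.length := by omega
    obtain ⟨hlenL, hsmall, hsem, hJ⟩ := hinv
    have hcast1 : ((i + 1 : Nat) : Int) = (i : Int) + 1 := by push_cast; ring
    rw [PySem.List.pyRange_one_cons (by exact_mod_cast hi), List.foldl_cons]
    have hgd : (pvMkE L).getD (i : Int) [] = L.getD i [] :=
      pv_mkE_getD_nat L i (by omega)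
    cases hmx : PySem.List.max? (L.getD i []) (fun y => y) with
    | none =>
      have hnil : L.getD i [] = [] := (PySem.List.max?_eq_none_iff _ _).mp hmx
      have hstep : pvStep (b, pvMkE L) (i : Int) = (b, pvMkE L) := by
        unfold pvStep
        rw [hgd, hmx]
      rw [hstep]
      obtain ⟨b', L', heq', hinv', htok', himp⟩ := ih (i+1) (by omega) (by omega) (by omega) b L
        ⟨hlenL, hsmall, hsem, hJ⟩
        (fun j hj1 hj2 => habove j (by omega) hj2)
        (fun j hj1 hj2 w hw h255w => by
          by_cases hji : j = i
          · subst hji; rw [hnil] at hw; simp at hw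
          · exact hbelow j hj1 (by omega) w hw h255w)
      rw [hcast1] at heq'
      refine ⟨b', L', heq', hinv', htok', ?_⟩
      intro hb'
      obtain ⟨hb, hLL, hflat⟩ := himp hb'
      refine ⟨hb, hLL, ?_⟩
      intro j hj1 hj2 w hw
      by_cases hji : j = i
      · subst hji; rw [hnil] at hw; simp at hw
      · exact hflat j (by omega) hj2 w hw
    | some mx =>
      by_cases hbig : mx > 255
      · -- expansion step
        have hxtok : ∀ v ∈ L.getD i [], 255 < v → pvOK vocab (m+1) v = true :=
          habove i (le_refl _) hi
        have hexp : pvAExpand (pvMkE L) (L.getD i []) = pvExpL L (L.getD i []) := by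
          unfold pvAExpand pvExpL
          apply PySem.List.foldl_congr_mem
          intro acc v hv
          by_cases hv255 : v > 255
          · rw [if_pos hv255, if_pos hv255]
            have hrange := pvOK_range vocab (m+1) v (hxtok v hv (by omega))
            rw [pvMkE_getD L v hrange.1 (by rw [hlenL]; exact hrange.2)]
          · rw [if_neg hv255, if_neg hv255]
        have hstep : pvStep (b, pvMkE L) (i : Int) =
            (false, pvMkE (L.set i (pvExpL L (L.getD i [])))) := by
          unfold pvStep
          rw [hgd, hmx]
          simp only [if_pos hbig]
          rw [hexp, pv_insert_mkE L i _ (by omega)]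
        rw [hstep]
        set N := pvExpL L (L.getD i []) with hN
        have hsemN : pvSem vocab N = pvE vocab (vocab.length + 1) (i : Int) := by
          rw [hN]
          rw [pvExpL_sem vocab L (L.getD i []) ?_]
          · exact hsem i hi h255
          · intro v hv h255v
            have hrange := pvOK_range vocab (m+1) v (hxtok v hv h255v)
            refine ⟨hrange.1, hrange.2, ?_⟩
            have hvn : v.toNat < vocab.length := by omega
            have hv255 : 255 ≤ v.toNat := by omega
            have hc : ((v.toNat : Nat) : Int) = v := by omega
            rw [← hc]
            exact hsem v.toNat hvn hv255
        have hinv2 : pvInv vocab (L.set i N) := by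
          refine ⟨by simpa using hlenL, ?_, ?_, ?_⟩
          · intro j hj
            rw [pv_getD_set_ne L i N j (by omega)]
            exact hsmall j hj
          · intro j hj hj255
            by_cases hji : i = j
            · subst hji
              rw [pv_getD_set_self L i N (by omega)]
              exact hsemN
            · rw [pv_getD_set_ne L i N j (by omega)]
              exact hsem j hj hj255
          · intro j hj hj255 k hok w hw h255w
            by_cases hji : i = j
            · subst hji
              rw [pv_getD_set_self L i N (by omega)] at hw
              exact pvExpL_tok' vocab L (L.getD i []) k hJ
                (fun v hv h255v => hJ i hi h255 k hok v hv h255v) w hw h255w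
            · rw [pv_getD_set_ne L i N j (by omega)] at hw
              exact hJ j hj hj255 k hok w hw h255w
        obtain ⟨b', L', heq', hinv', htok', himp⟩ := ih (i+1) (by omega) (by omega) (by omega)
          false (L.set i N) hinv2
          (fun j hj1 hj2 w hw h255w => by
            rw [pv_getD_set_ne L i N j (by omega)] at hw
            exact habove j (by omega) hj2 w hw h255w)
          (fun j hj1 hj2 w hw h255w => by
            by_cases hji : i = j
            · subst hji
              rw [pv_getD_set_self L i N (by omega)] at hw
              exact pvExpL_tok vocab L (L.getD i []) m hJ hxtok w hw h255w
            · rw [pv_getD_set_ne L i N j (by omega)] at hw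
              exact hbelow j hj1 (by omega) w hw h255w)
        rw [hcast1] at heq'
        refine ⟨b', L', heq', hinv', htok', ?_⟩
        intro hb'
        obtain ⟨hb, _, _⟩ := himp hb'
        exact absurd hb (by simp)
      · -- max ≤ 255: identity step
        have hstep : pvStep (b, pvMkE L) (i : Int) = (b, pvMkE L) := by
          unfold pvStep
          rw [hgd, hmx]
          simp only [if_neg hbig]
        rw [hstep]
        have hsmalltok : ∀ w ∈ L.getD i [], w ≤ 255 := by
          intro w hw
          have := PySem.List.max?_isMax hmx w hw
          simp at this
          omega
        obtain ⟨b', L', heq', hinv', htok', himp⟩ := ih (i+1) (by omega) (by omega) (by omega) b L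
          ⟨hlenL, hsmall, hsem, hJ⟩
          (fun j hj1 hj2 => habove j (by omega) hj2)
          (fun j hj1 hj2 w hw h255w => by
            by_cases hji : j = i
            · subst hji
              exact absurd (hsmalltok w hw) (by omega)
            · exact hbelow j hj1 (by omega) w hw h255w)
        rw [hcast1] at heq'
        refine ⟨b', L', heq', hinv', htok', ?_⟩
        intro hb'
        obtain ⟨hb, hLL, hflat⟩ := himp hb'
        refine ⟨hb, hLL, ?_⟩
        intro j hj1 hj2 w hw
        by_cases hji : j = i
        · subst hji
          exact hsmalltok w hw
        · exact hflat j (by omega) hj2 w hw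

theorem pvSem_id (vocab : List (List Int)) (xs : List Int) (h : ∀ w ∈ xs, w ≤ 255) :
    pvSem vocab xs = xs := by
  unfold pvSem
  rw [pv_flatMap_congr xs _ (fun v => [v]) (by
    intro v hv
    rw [if_neg (by have := h v hv; omega)])]
  simp

theorem pv_flat_done (vocab L : List (List Int)) (hinv : pvInv vocab L)
    (hflat : ∀ j : Nat, j < vocab.length → 255 ≤ j → ∀ w ∈ L.getD j [], w ≤ 255) :
    L = pvFlatL vocab := by
  obtain ⟨hlenL, hsmall, hsem, _⟩ := hinv
  apply List.ext_getElem (by rw [hlenL, pvFlatL_length])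
  intro j h1 h2
  have hj : j < vocab.length := by rw [← hlenL]; exact h1
  rw [← List.getD_eq_getElem L [] h1, ← List.getD_eq_getElem (pvFlatL vocab) [] h2]
  rw [pvFlatL_getD vocab j hj]
  by_cases hc : j < 255
  · rw [if_pos hc]
    exact hsmall j hc
  · rw [if_neg hc]
    rw [← hsem j hj (by omega)]
    rw [pvSem_id vocab _ (hflat j hj (by omega))]

theorem pv_flat_small (vocab : List (List Int)) (hn : vocab.length ≤ 255) :
    pvFlatL vocab = vocab := by
  apply List.ext_getElem (pvFlatL_length vocab)
  intro j h1 h2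
  rw [← List.getD_eq_getElem (pvFlatL vocab) [] h1, ← List.getD_eq_getElem vocab [] h2]
  rw [pvFlatL_getD vocab j h2, if_pos (by omega)]

theorem pv_pass_flat (vocab L : List (List Int)) (hlenL : L.length = vocab.length)
    (hflat : ∀ j : Nat, j < vocab.length → 255 ≤ j → ∀ w ∈ L.getD j [], w ≤ 255) :
    ∀ (is : List Int), (∀ i ∈ is, 255 ≤ i ∧ i < (vocab.length : Int)) → ∀ b,
      is.foldl pvStep (b, pvMkE L) = (b, pvMkE L) := by
  intro is
  induction is with
  | nil => intro _ b; rfl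
  | cons i t ih =>
    intro hmem b
    rw [List.foldl_cons]
    have hi255 := (hmem i (by simp)).1
    have hilen := (hmem i (by simp)).2
    have hgd : (pvMkE L).getD i [] = L.getD i.toNat [] := by
      have hc : ((i.toNat : Nat) : Int) = i := by omega
      rw [← hc, pv_mkE_getD_nat L i.toNat (by omega)]
      congr 1
    have hstep : pvStep (b, pvMkE L) i = (b, pvMkE L) := by
      unfold pvStep
      rw [hgd]
      cases hmx : PySem.List.max? (L.getD i.toNat []) (fun y => y) with
      | none => rfl
      | some mx =>
        have hmem' := PySem.List.max?_mem hmx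
        have hle := hflat i.toNat (by omega) (by omega) mx hmem'
        simp only []
        rw [if_neg (by omega)]
    rw [hstep]
    exact ih (fun j hj => hmem j (by simp [hj])) b

theorem pv_loop_main (vocab : List (List Int)) (hn : 255 ≤ vocab.length) :
    ∀ (k fuel : Nat) (L : List (List Int)), pvInv vocab L → pvTok vocab k L → k < fuel →
      pvALoop fuel (vocab.length : Int) (pvMkE L) = pvMkE (pvFlatL vocab) := by
  intro k
  induction k with
  | zero =>
    intro fuel L hinv htok hfuel
    obtain ⟨f, rfl⟩ : ∃ f, fuel = f + 1 := ⟨fuel - 1, by omega⟩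
    have hflat : ∀ j : Nat, j < vocab.length → 255 ≤ j → ∀ w ∈ L.getD j [], w ≤ 255 := by
      intro j hj hj255 w hw
      by_contra hcon
      have := htok j hj hj255 w hw (by omega)
      simp [pvOK] at this
    simp only [pvALoop, pvAPass_eq]
    rw [pv_pass_flat vocab L hinv.1 hflat _ (by
      intro i hi
      have := PySem.List.mem_pyRange_one.mp hi
      omega) true]
    simp [pv_flat_done vocab L hinv hflat]
  | succ k ih =>
    intro fuel L hinv htok hfuel
    obtain ⟨f, rfl⟩ : ∃ f, fuel = f + 1 := ⟨fuel - 1, by omega⟩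
    obtain ⟨b', L', heq', hinv', htok', himp⟩ :=
      pv_pass1 vocab k (vocab.length - 255) 255 (le_refl _) hn rfl true L hinv
        (fun j hj1 hj2 w hw h255w => htok j hj2 hj1 w hw h255w)
        (fun j hj1 hj2 w hw h255w => by omega)
    have hc255 : ((255 : Nat) : Int) = (255 : Int) := by norm_num
    rw [hc255] at heq'
    simp only [pvALoop, pvAPass_eq]
    rw [heq']
    cases b' with
    | true =>
      obtain ⟨_, hLL, hflat⟩ := himp rfl
      subst hLL
      simp only [if_true]
      rw [pv_flat_done vocab L' hinv (by
        intro j hj hj255 w hw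
        exact hflat j hj255 hj w hw)]
    | false =>
      simp only [Bool.false_eq_true, if_false]
      exact ih f L' hinv' htok' (by omega)

theorem pv_cacheOK_empty (vocab : List (List Int)) : pvCacheOK vocab PySem.Dict.empty := by
  intro j r h
  simp [PySem.Dict.get?, PySem.Dict.empty] at h

theorem pv_bexp (vocab : List (List Int)) :
    ∀ (k fuel : Nat), k ≤ fuel → k ≤ vocab.length + 1 →
    ∀ (i : Int) (c : PySem.Dict Int (List Int)),
      pvOK vocab k i = true → pvCacheOK vocab c →
      (pvBExpand vocab fuel i c).1 = pvE vocab (vocab.length + 1) i ∧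
      pvCacheOK vocab (pvBExpand vocab fuel i c).2 := by
  intro k
  induction k with
  | zero => intro fuel _ _ i c hok _; simp [pvOK] at hok
  | succ k ih =>
    intro fuel hkf hkn i c hok hc
    obtain ⟨f, rfl⟩ : ∃ f, fuel = f + 1 := ⟨fuel - 1, by omega⟩
    have htok := pvOK_tokens vocab k i hok
    simp only [pvBExpand]
    cases hget : c.get? i with
    | some r =>
      exact ⟨hc i r hget, hc⟩
    | none =>
      have hfold : ∀ (ts : List Int), (∀ v ∈ ts, 255 < v → pvOK vocab k v = true) →
          ∀ (acc : List Int) (c0 : PySem.Dict Int (List Int)), pvCacheOK vocab c0 →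
          (ts.foldl (fun (st : List Int × PySem.Dict Int (List Int)) v =>
              if v > 255 then
                let r := pvBExpand vocab f v st.2
                (st.1 ++ r.1, r.2)
              else (st.1 ++ [v], st.2)) (acc, c0)).1 =
            acc ++ ts.flatMap (fun v => if 255 < v then pvE vocab (vocab.length + 1) v else [v]) ∧
          pvCacheOK vocab (ts.foldl (fun (st : List Int × PySem.Dict Int (List Int)) v =>
              if v > 255 then
                let r := pvBExpand vocab f v st.2
                (st.1 ++ r.1, r.2)
              else (st.1 ++ [v], st.2)) (acc, c0)).2 := by
        intro ts
        induction ts with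
        | nil => intro _ acc c0 hc0; simp; exact hc0
        | cons v ts' iht =>
          intro hvs acc c0 hc0
          rw [List.foldl_cons]
          by_cases hv : v > 255
          · simp only [if_pos hv]
            obtain ⟨hr1, hr2⟩ := ih f (by omega) (by omega) v c0 (hvs v (by simp) (by omega)) hc0
            obtain ⟨ha, hb⟩ := iht (fun w hw h255 => hvs w (by simp [hw]) h255)
              (acc ++ (pvBExpand vocab f v c0).1) (pvBExpand vocab f v c0).2 hr2
            refine ⟨?_, hb⟩
            rw [ha, hr1]
            simp [hv]
          · simp only [if_neg hv]
            obtain ⟨ha, hb⟩ := iht (fun w hw h255 => hvs w (by simp [hw]) h255)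
              (acc ++ [v]) c0 hc0
            refine ⟨?_, hb⟩
            rw [ha]
            simp [hv]
      obtain ⟨ha, hb⟩ := hfold (PySem.List.pyGetD vocab i []) htok [] c hc
      have hok1 : pvOK vocab (vocab.length + 1) i = true :=
        pvOK_mono vocab (k+1) i hok (vocab.length + 1) hkn
      have hsem : ([] : List Int) ++ (PySem.List.pyGetD vocab i []).flatMap
          (fun v => if 255 < v then pvE vocab (vocab.length + 1) v else [v]) =
          pvE vocab (vocab.length + 1) i := by
        rw [List.nil_append]
        exact pvE_sem vocab i hok1
      constructor
      · rw [ha, hsem]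
      · intro j r hj
        rw [PySem.Dict.get?_insert] at hj
        by_cases hji : j = i
        · rw [if_pos hji] at hj
          have : r = _ := (Option.some_inj.mp hj).symm
          rw [← this] at *
          rw [hji]
          rw [← hsem, ← ha]
          exact (Option.some_inj.mp hj).symm ▸ rfl
        · rw [if_neg hji] at hj
          exact hb j r hj

theorem pv_btop (vocab : List (List Int)) :
    ∀ (l : List (List Int)) (s : Int) (acc : List (List Int)) (c : PySem.Dict Int (List Int)),
      pvCacheOK vocab c →
      (∀ p ∈ PySem.List.enumerate l s, 255 ≤ p.1 → pvOK vocab (vocab.length + 1) p.1 = true) →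
      ((PySem.List.enumerate l s).foldl
        (fun (st : List (List Int) × PySem.Dict Int (List Int)) p =>
          if p.1 < 255 then (st.1 ++ [p.2], st.2)
          else
            let r := pvBExpand vocab (vocab.length + 1) p.1 st.2
            (st.1 ++ [r.1], r.2)) (acc, c)).1 =
        acc ++ (PySem.List.enumerate l s).map
          (fun p => if p.1 < 255 then p.2 else pvE vocab (vocab.length + 1) p.1) := by
  intro l
  induction l with
  | nil => intro s acc c _ _; simp [PySem.List.enumerate_nil]
  | cons a t ihl =>
    intro s acc c hc hok
    rw [PySem.List.enumerate_cons, List.foldl_cons, List.map_cons]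
    by_cases hs : s < 255
    · simp only [if_pos hs]
      rw [ihl (s+1) (acc ++ [a]) c hc
        (fun p hp h255 => hok p (by rw [PySem.List.enumerate_cons]; exact List.mem_cons_of_mem _ hp) h255)]
      simp
    · simp only [if_neg hs]
      obtain ⟨hr1, hr2⟩ := pv_bexp vocab (vocab.length + 1) (vocab.length + 1) (le_refl _) (le_refl _)
        s c (hok (s, a) (by rw [PySem.List.enumerate_cons]; simp) (by omega)) hc
      rw [ihl (s+1) _ _ hr2
        (fun p hp h255 => hok p (by rw [PySem.List.enumerate_cons]; exact List.mem_cons_of_mem _ hp) h255)]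
      rw [hr1]
      simp

-- ===== VERDICT (by name: the statement is the Claim_ definition above) =====
theorem bulid_len_dict_spec : Claim_equal_bulid_len_dict := by
  intro vocab _ hpre
  unfold Spec_bulid_len_dict
  show bulid_len_dict vocab = bulid_len_dict_alt vocab
  have hinv0 : pvInv vocab vocab := by
    refine ⟨rfl, fun j hj => rfl, ?_, ?_⟩
    · intro j hj hj255
      have hok := pv_pre_spec vocab hpre j hj hj255
      have h1 := pvE_sem vocab (j : Int) hok
      rwa [PySem.List.pyGetD_natCast] at h1
    · intro j hj hj255 k hok w hw h255w
      have h1 := pvOK_tokens vocab k (j : Int) hok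
      rw [PySem.List.pyGetD_natCast] at h1
      exact h1 w hw h255w
  have htok0 : pvTok vocab vocab.length vocab := by
    intro j hj hj255 w hw h255w
    have hok := pv_pre_spec vocab hpre j hj hj255
    have h1 := pvOK_tokens vocab vocab.length (j : Int) hok
    rw [PySem.List.pyGetD_natCast] at h1
    exact h1 w hw h255w
  have hloop : pvALoop (vocab.length + 2) (vocab.length : Int) (pvMkE vocab) = pvMkE (pvFlatL vocab) := by
    by_cases hn : 255 ≤ vocab.length
    · exact pv_loop_main vocab hn vocab.length (vocab.length + 2) vocab hinv0 htok0 (by omega)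
    · simp only [pvALoop, pvAPass_eq]
      rw [PySem.List.pyRange_one_eq_nil (by exact_mod_cast (by omega : vocab.length ≤ 255))]
      simp [pv_flat_small vocab (by omega)]
  have hflatB : ((PySem.List.enumerate vocab 0).foldl
      (fun (st : List (List Int) × PySem.Dict Int (List Int)) p =>
        if p.1 < 255 then (st.1 ++ [p.2], st.2)
        else
          let r := pvBExpand vocab (vocab.length + 1) p.1 st.2
          (st.1 ++ [r.1], r.2)) ([], PySem.Dict.empty)).1 = pvFlatL vocab := by
    rw [pv_btop vocab vocab 0 [] PySem.Dict.empty (pv_cacheOK_empty vocab)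
      (fun p hp h255 => (hpre p hp h255).2)]
    rw [List.nil_append]
    rfl
  unfold bulid_len_dict bulid_len_dict_alt
  simp only [pv_init, hloop, pv_keys_map_getD, hflatB]
  have hfunA : (fun (st : Int × PySem.Dict Int (List (List Int))) (line : List Int) =>
        (max st.1 (line.length : Int),
        (if st.2.contains (line.length : Int) = true then st.2
          else st.2.insert (line.length : Int) []).modify (line.length : Int) []
          fun ls => ls ++ [line])) =
      fun (st : Int × PySem.Dict Int (List (List Int))) (line : List Int) =>
        (max st.1 (line.length : Int),
          st.2.insert ((line.length : Int)) (st.2.getD (line.length : Int) [] ++ [line])) := by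
    funext st line
    rw [pv_group_step]
  have hfunB : (fun (st : Int × PySem.Dict Int (List (List Int))) (line : List Int) =>
      (max st.1 (line.length : Int),
        if st.2.contains (line.length : Int) = true then
          st.2.modify (line.length : Int) [] (fun ls => ls ++ [line])
        else st.2.insert (line.length : Int) [line])) =
      fun (st : Int × PySem.Dict Int (List (List Int))) (line : List Int) =>
        (max st.1 (line.length : Int),
          st.2.insert ((line.length : Int)) (st.2.getD (line.length : Int) [] ++ [line])) := by
    funext st line
    rw [pv_group_step_b]
  rw [hfunA, hfunB]
  rw [show (PySem.Dict.empty : PySem.Dict Int (List Int)) = PySem.Dict.mk [] from rfl]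
  rw [pv_foldl_insert_enum (pvFlatL vocab) 0 [] (by simp)]
  simp [pvMkE]
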